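-- pv_equiv track=rewrite | github.com/DavidMolinari/Python-CodingBat | Warmup-1/decalage.py | occurence2
-- ===== SOURCE A (Python) =====
-- def occurence2(message):
--     a = "abcdefghijklmnopqrstuvwxyz"
--     A = "ABCDEFGHIJKLMNOPQRSTUVWXYZ"
--     tab = [0]*len(a)
--     lettremax = ""
--     meh = 0
--     nb = 0
--     n = len(message)
--     for i in range(0, n):
--         for j in range (0, len(a)):
--             if message[i] == a[j] or message[i] == A[j]:
--                 tab[j] = tab[j]+1
--             if (tab[j] > nb):
--                 nb = tab[j]
--                 lettremax=message[i]
--     return (lettremax)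
-- ===== SOURCE B (Python) =====
-- def occurence2(message):
--     lows = "abcdefghijklmnopqrstuvwxyz"
--     # pass 1: maximum case-insensitive frequency over the 26 ASCII letters
--     m = 0
--     for l in lows:
--         c = sum(1 for ch in message if ch.lower() == l)
--         if c > m:
--             m = c
--     if m == 0:
--         return ""
--     # pass 2: first character whose letter's running count reaches m
--     run = [0] * 26
--     for ch in message:
--         j = lows.find(ch.lower())
--         if j >= 0:
--             run[j] += 1
--             if run[j] == m:
--                 return ch
--     return ""
-- ===== Notes on version B (the rewrite author's own statement) =====
-- stated objective: alternative
-- what changed: A finds the answer in one pass with a nested 26-way scan that maintains a running maximum and rewrites the answer at every new maximum; B first computes the maximum case-insensitive letter frequency (one counting pass per letter) and then a separate locating pass returns the first character whose letter's running count reaches that maximum.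
import Mathlib
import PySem

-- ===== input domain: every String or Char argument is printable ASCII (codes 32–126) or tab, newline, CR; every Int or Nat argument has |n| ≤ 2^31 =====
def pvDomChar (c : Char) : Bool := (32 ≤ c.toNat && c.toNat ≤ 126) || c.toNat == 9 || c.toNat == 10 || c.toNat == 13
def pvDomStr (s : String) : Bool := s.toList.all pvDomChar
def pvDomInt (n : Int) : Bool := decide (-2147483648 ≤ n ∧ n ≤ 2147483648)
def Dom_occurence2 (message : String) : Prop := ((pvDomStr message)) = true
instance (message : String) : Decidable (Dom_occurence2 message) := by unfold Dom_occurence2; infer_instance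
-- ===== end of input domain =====

-- B restates A's combined running-max scan as max-frequency pass + locating pass (objective: alternative decomposition, same cost).

-- ===== PORT A =====
-- A's locals a, A hoisted as constants
def aLowers : List Char := "abcdefghijklmnopqrstuvwxyz".toList
def aUppers : List Char := "ABCDEFGHIJKLMNOPQRSTUVWXYZ".toList

-- body of A's inner 'for j in range(0, len(a))' loop; state = (tab, lettremax, nb)
def aBody (c : Char) (st : List Int × String × Int) (j : Nat) : List Int × String × Int :=
  let tab := if c = aLowers.getD j ' ' ∨ c = aUppers.getD j ' ' then st.1.set j (st.1.getD j 0 + 1) else st.1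
  if tab.getD j 0 > st.2.2 then (tab, String.singleton c, tab.getD j 0)
  else (tab, st.2.1, st.2.2)

def aInner (c : Char) (st : List Int × String × Int) : List Int × String × Int :=
  (List.range 26).foldl (aBody c) st

def occurence2 (message : String) : String :=
  (message.toList.foldl (fun st c => aInner c st) (List.replicate 26 (0:Int), "", (0:Int))).2.1

-- ===== PORT B =====
def bLowers : List Char := "abcdefghijklmnopqrstuvwxyz".toList

-- Source B's second loop ('return the first char whose running count reaches m')
def bLocate (m : Int) (run : List Int) : List Char → String
  | [] => ""
  | ch :: rest =>
    let j := PySem.Chars.find bLowers [PySem.Chars.lowerChar ch]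
    if 0 ≤ j then
      let run' := run.set j.toNat (run.getD j.toNat 0 + 1)
      if run'.getD j.toNat 0 = m then String.singleton ch
      else bLocate m run' rest
    else bLocate m run rest

def occurence2_alt (message : String) : String :=
  let m := bLowers.foldl (fun m l =>
    let c : Int := (message.toList.countP (fun ch => decide (PySem.Chars.lowerChar ch = l)) : Int)
    if c > m then c else m) 0
  if m = 0 then "" else bLocate m (List.replicate 26 (0:Int)) message.toList

-- ===== PRECONDITION & SPEC =====
def Spec_occurence2 (message : String) (out : String) : Prop := out = occurence2_alt message
instance (message : String) (out : String) : Decidable (Spec_occurence2 message out) := by unfold Spec_occurence2; infer_instance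

-- ===== CLAIM (what is proved, stated in full; the proofs are below) =====
def Claim_equal_occurence2 : Prop := ∀ (message : String), Dom_occurence2 message → Spec_occurence2 message (occurence2 message)

-- ===== LEMMAS AND PROOFS =====

-- proof-side vocabulary
def mtch (c : Char) (j : Nat) : Bool := decide (c = aLowers.getD j ' ') || decide (c = aUppers.getD j ' ')
def cnt (p : List Char) (j : Nat) : Int := (p.countP (fun c => mtch c j) : Int)
def jIdx (c : Char) : Int := PySem.Chars.find bLowers [PySem.Chars.lowerChar c]
def mx (p : List Char) : Int := (List.range 26).foldl (fun m j => max m (cnt p j)) 0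
def tabOf (p : List Char) : List Int := (List.range 26).map (cnt p)
def runStep (r : List Int) (c : Char) : List Int :=
  if 0 ≤ jIdx c then r.set (jIdx c).toNat (r.getD (jIdx c).toNat 0 + 1) else r
def runOf (r : List Int) (p : List Char) : List Int := p.foldl runStep r
def resOf (p : List Char) : String :=
  if mx p = 0 then "" else bLocate (mx p) (List.replicate 26 (0:Int)) p

-- small generic facts
theorem chOfNatToNat (n : Nat) (h : n < 55296) : (Char.ofNat n).toNat = n := by
  rw [Char.toNat_ofNat, if_pos (Or.inl h)]

theorem chInj (a b : Char) (h : a.toNat = b.toNat) : a = b := by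
  cases a; cases b
  simp only [Char.toNat] at h
  have := UInt32.toNat_inj.mp h
  subst this; rfl

theorem lowInv2 (c d : Char)
    (h : PySem.Chars.lowerChar c = d) : c = d ∨ c = Char.ofNat (d.toNat - 32) := by
  unfold PySem.Chars.lowerChar PySem.Chars.isupper at h
  split at h
  · right
    rename_i hup
    simp only [Bool.and_eq_true, decide_eq_true_eq, Char.le_def, UInt32.le_iff_toNat_le] at hup
    have h1 : 65 ≤ c.toNat := hup.1
    have h2 : c.toNat ≤ 90 := hup.2
    have hv := congrArg Char.toNat h
    rw [chOfNatToNat _ (by omega)] at hv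
    exact chInj _ _ (by rw [chOfNatToNat _ (by omega)]; omega)
  · exact Or.inl h

theorem singNe (c : Char) : String.singleton c ≠ "" := by
  intro h
  have := congrArg String.toList h
  simp at this

theorem getD_set_ne (l : List Int) (i v : _) (j : Nat) (h : j ≠ i) :
    (l.set i v).getD j 0 = l.getD j 0 := by
  simp [List.getD, List.getElem?_set_ne (Ne.symm h)]

theorem getD_set_self (l : List Int) (i : Nat) (v : Int) (h : i < l.length) :
    (l.set i v).getD i 0 = v := by
  simp [List.getD, h]

theorem getD_out (l : List Int) (j : Nat) (h : l.length ≤ j) : l.getD j 0 = 0 := by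
  simp [List.getD, List.getElem?_eq_none h]

-- the character classification: either c matches no letter column, or exactly one, and jIdx points at it
theorem key (j : Nat) (hj : j < 26) (c : Char) :
    (PySem.Chars.lowerChar c = bLowers.getD j ' ') ↔ mtch c j = true := by
  constructor
  · intro h
    interval_cases j <;>
      (rcases lowInv2 c _ h with rfl | rfl <;> decide)
  · intro h
    have h' : c = aLowers.getD j ' ' ∨ c = aUppers.getD j ' ' := by
      simpa [mtch] using h
    interval_cases j <;> (rcases h' with rfl | rfl <;> decide)

theorem classifyAux (c : Char) (h0 : 0 ≤ jIdx c) (h4 : (jIdx c).toNat < 26)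
    (h2 : mtch c (jIdx c).toNat = true)
    (h3 : ∀ j, j < 26 → mtch c j = true → j = (jIdx c).toNat) :
    (∃ j0 : Nat, j0 < 26 ∧ jIdx c = (j0 : Int) ∧ mtch c j0 = true ∧
      ∀ j, j < 26 → mtch c j = true → j = j0) :=
  ⟨(jIdx c).toNat, h4, (Int.toNat_of_nonneg h0).symm, h2, h3⟩

set_option maxHeartbeats 2000000 in
theorem classify (c : Char) :
    (jIdx c = -1 ∧ ∀ j, j < 26 → ¬ mtch c j = true) ∨
    (∃ j0 : Nat, j0 < 26 ∧ jIdx c = (j0 : Int) ∧ mtch c j0 = true ∧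
      ∀ j, j < 26 → mtch c j = true → j = j0) := by
  by_cases h : PySem.Chars.lowerChar c ∈ bLowers
  · right
    rw [show bLowers = ['a','b','c','d','e','f','g','h','i','j','k','l','m','n','o','p','q','r','s','t','u','v','w','x','y','z'] from by decide] at h
    simp only [List.mem_cons, List.not_mem_nil, or_false] at h
    rcases h with h|h|h|h|h|h|h|h|h|h|h|h|h|h|h|h|h|h|h|h|h|h|h|h|h|h <;>
      (rcases lowInv2 c _ h with rfl | rfl <;>
        exact classifyAux _ (by decide) (by decide) (by decide) (by decide))
  · left
    constructor
    · rw [jIdx, PySem.Chars.find_eq_neg_one_iff, List.singleton_infix_iff]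
      exact h
    · intro j hj hm
      exact h (by rw [(key j hj c).mpr hm]; exact (by rw [List.getD_eq_getElem bLowers ' ' (by rw [show bLowers.length = 26 from by decide]; omega)]; exact List.getElem_mem _))

-- fold-max toolkit
theorem fm_start (f : Nat → Int) (l : List Nat) (a : Int) :
    a ≤ l.foldl (fun m j => max m (f j)) a := by
  induction l generalizing a with
  | nil => exact le_refl _
  | cons x xs ih => exact le_trans (le_max_left _ _) (ih _)

theorem fm_mem (f : Nat → Int) (l : List Nat) :
    ∀ (a : Int) {j : Nat}, j ∈ l → f j ≤ l.foldl (fun m k => max m (f k)) a := by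
  induction l with
  | nil => intro a j hj; cases hj
  | cons x xs ih =>
    intro a j hj
    rcases List.mem_cons.mp hj with rfl | h
    · exact le_trans (le_max_right _ _) (fm_start f xs _)
    · exact ih _ h

theorem fm_attain (f : Nat → Int) (l : List Nat) (a : Int) :
    l.foldl (fun m j => max m (f j)) a = a ∨ ∃ j ∈ l, l.foldl (fun m j => max m (f j)) a = f j := by
  induction l generalizing a with
  | nil => exact Or.inl rfl
  | cons x xs ih =>
    rcases ih (max a (f x)) with h | ⟨j, hj, h⟩
    · rcases max_choice a (f x) with hm | hm
      · exact Or.inl (by rw [List.foldl_cons, h, hm])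
      · exact Or.inr ⟨x, List.mem_cons_self, by rw [List.foldl_cons, h, hm]⟩
    · exact Or.inr ⟨j, List.mem_cons_of_mem _ hj, h⟩

-- cnt facts
theorem cnt_nonneg (p : List Char) (j : Nat) : 0 ≤ cnt p j := Int.natCast_nonneg _

theorem cnt_nil (j : Nat) : cnt [] j = 0 := rfl

theorem cnt_cons (c : Char) (p : List Char) (j : Nat) :
    cnt (c :: p) j = (if mtch c j then 1 else 0) + cnt p j := by
  simp only [cnt, List.countP_cons]
  split <;> simp_all <;> omega

theorem cnt_snoc (p : List Char) (c : Char) (j : Nat) :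
    cnt (p ++ [c]) j = cnt p j + (if mtch c j then 1 else 0) := by
  simp only [cnt, List.countP_append, List.countP_cons, List.countP_nil]
  split <;> simp_all <;> omega

-- mx facts
theorem mx_nonneg (p : List Char) : 0 ≤ mx p := fm_start _ _ _

theorem cnt_le_mx (p : List Char) {j : Nat} (hj : j < 26) : cnt p j ≤ mx p :=
  fm_mem _ _ _ (List.mem_range.mpr hj)

theorem mx_attain (p : List Char) : mx p = 0 ∨ ∃ j, j < 26 ∧ mx p = cnt p j := by
  rcases fm_attain (cnt p) (List.range 26) 0 with h | ⟨j, hj, h⟩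
  · exact Or.inl h
  · exact Or.inr ⟨j, List.mem_range.mp hj, h⟩

theorem mx_ub (p : List Char) (b : Int) (hb : 0 ≤ b) (h : ∀ j, j < 26 → cnt p j ≤ b) :
    mx p ≤ b := by
  rcases mx_attain p with hm | ⟨j, hj, hm⟩
  · omega
  · rw [hm]; exact h j hj

theorem mx_snoc_miss (p : List Char) (c : Char) (h : ∀ j, j < 26 → ¬ mtch c j = true) :
    mx (p ++ [c]) = mx p := by
  unfold mx
  refine PySem.List.foldl_congr_mem _ _ _ _ ?_
  intro acc j hj
  rw [cnt_snoc, if_neg (h j (List.mem_range.mp hj)), add_zero]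

theorem cnt_snoc_hit (p : List Char) (c : Char) {j0 : Nat} (hj0 : j0 < 26)
    (hm : mtch c j0 = true) (hu : ∀ j, j < 26 → mtch c j = true → j = j0) :
    ∀ j, j < 26 → cnt (p ++ [c]) j = if j = j0 then cnt p j0 + 1 else cnt p j := by
  intro j hj
  rw [cnt_snoc]
  by_cases h : j = j0
  · subst h; rw [if_pos hm, if_pos rfl]
  · rw [if_neg (fun hc => h (hu j hj hc)), if_neg h, add_zero]

theorem mx_snoc_hit (p : List Char) (c : Char) {j0 : Nat} (hj0 : j0 < 26)
    (hm : mtch c j0 = true) (hu : ∀ j, j < 26 → mtch c j = true → j = j0) :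
    mx (p ++ [c]) = max (mx p) (cnt p j0 + 1) := by
  have hc := cnt_snoc_hit p c hj0 hm hu
  apply le_antisymm
  · apply mx_ub
    · exact le_trans (mx_nonneg p) (le_max_left _ _)
    · intro j hj
      rw [hc j hj]
      by_cases h : j = j0
      · rw [if_pos h]; exact le_max_right _ _
      · rw [if_neg h]; exact le_trans (cnt_le_mx p hj) (le_max_left _ _)
  · apply max_le
    · apply mx_ub _ _ (mx_nonneg _)
      intro j hj
      refine le_trans ?_ (cnt_le_mx (p ++ [c]) hj)
      rw [cnt_snoc]; split <;> omega
    · have := cnt_le_mx (p ++ [c]) hj0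
      rw [hc j0 hj0, if_pos rfl] at this
      exact this

-- tabOf facts
theorem tabOf_length (p : List Char) : (tabOf p).length = 26 := by simp [tabOf]

theorem tabOf_getD (p : List Char) {j : Nat} (hj : j < 26) : (tabOf p).getD j 0 = cnt p j :=
  PySem.List.getD_map_range _ _ _ _ hj

theorem tabOf_getD_all (p : List Char) (j : Nat) : (tabOf p).getD j 0 ≤ mx p := by
  by_cases hj : j < 26
  · rw [tabOf_getD p hj]; exact cnt_le_mx p hj
  · rw [getD_out _ _ (by rw [tabOf_length]; omega)]; exact mx_nonneg p

theorem tabOf_snoc_miss (p : List Char) (c : Char) (h : ∀ j, j < 26 → ¬ mtch c j = true) :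
    tabOf (p ++ [c]) = tabOf p := by
  unfold tabOf
  refine List.map_congr_left ?_
  intro j hj
  rw [cnt_snoc, if_neg (h j (List.mem_range.mp hj)), add_zero]

theorem tabOf_snoc_hit (p : List Char) (c : Char) {j0 : Nat} (hj0 : j0 < 26)
    (hm : mtch c j0 = true) (hu : ∀ j, j < 26 → mtch c j = true → j = j0) :
    tabOf (p ++ [c]) = (tabOf p).set j0 (cnt p j0 + 1) := by
  have hc := cnt_snoc_hit p c hj0 hm hu
  apply List.ext_getElem
  · simp [tabOf]
  · intro i h1 h2
    have hi : i < 26 := by simpa [tabOf] using h1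
    rw [List.getElem_set]
    by_cases h : i = j0
    · subst h
      simp only [if_pos rfl]
      have := hc i hi
      rw [if_pos rfl] at this
      simp [tabOf, hi, this]
    · rw [if_neg (Ne.symm h)]
      have := hc i hi
      rw [if_neg h] at this
      simp [tabOf, hi, this]

-- ===== A-side inner loop =====
theorem mtch_iff (c : Char) (j : Nat) :
    mtch c j = true ↔ (c = aLowers.getD j ' ' ∨ c = aUppers.getD j ' ') := by
  simp [mtch]

theorem aBody_miss (c : Char) (st : List Int × String × Int) (j : Nat)
    (h : ¬ mtch c j = true) (hub : st.1.getD j 0 ≤ st.2.2) : aBody c st j = st := by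
  unfold aBody
  rw [if_neg (fun hc => h ((mtch_iff c j).mpr hc))]
  rw [if_neg (not_lt.mpr hub)]

theorem seg_miss (c : Char) (l : List Nat) (st : List Int × String × Int)
    (hnm : ∀ j ∈ l, ¬ mtch c j = true) (hub : ∀ j, st.1.getD j 0 ≤ st.2.2) :
    l.foldl (aBody c) st = st := by
  induction l with
  | nil => rfl
  | cons x xs ih =>
    rw [List.foldl_cons, aBody_miss c st x (hnm x List.mem_cons_self) (hub x)]
    exact ih (fun j hj => hnm j (List.mem_cons_of_mem _ hj))

-- ===== B-side lemmas =====
theorem runOf_spec (p : List Char) : ∀ (r : List Int), r.length = 26 →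
    (runOf r p).length = 26 ∧ ∀ j, j < 26 → (runOf r p).getD j 0 = r.getD j 0 + cnt p j := by
  induction p with
  | nil => exact fun r hr => ⟨hr, fun j hj => by simp [runOf, cnt_nil]⟩
  | cons c p ih =>
    intro r hr
    have hfold : runOf r (c :: p) = runOf (runStep r c) p := rfl
    rcases classify c with ⟨hneg, hnm⟩ | ⟨j0, hj0, hidx, hm, hu⟩
    · have hstep : runStep r c = r := by simp [runStep, hneg]
      obtain ⟨h1, h2⟩ := ih r hr
      refine ⟨by rw [hfold, hstep]; exact h1, fun j hj => ?_⟩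
      rw [hfold, hstep, h2 j hj, cnt_cons, if_neg (hnm j hj)]
      ring
    · have hstep : runStep r c = r.set j0 (r.getD j0 0 + 1) := by
        simp [runStep, hidx]
      obtain ⟨h1, h2⟩ := ih (r.set j0 (r.getD j0 0 + 1)) (by simp [hr])
      refine ⟨by rw [hfold, hstep]; exact h1, fun j hj => ?_⟩
      rw [hfold, hstep, h2 j hj, cnt_cons]
      by_cases h : j = j0
      · subst h
        rw [getD_set_self _ _ _ (by omega), if_pos hm]
        ring
      · rw [getD_set_ne _ _ _ _ h, if_neg (fun hc => h (hu j hj hc))]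
        ring

theorem bLocate_none (p : List Char) : ∀ (r : List Int) (m : Int), r.length = 26 →
    (∀ j, j < 26 → r.getD j 0 + cnt p j < m) → bLocate m r p = "" := by
  induction p with
  | nil => intro r m _ _; rfl
  | cons c p ih =>
    intro r m hr h
    show (if 0 ≤ jIdx c then _ else _) = ""
    rw [show PySem.Chars.find bLowers [PySem.Chars.lowerChar c] = jIdx c from rfl]
    rcases classify c with ⟨hneg, hnm⟩ | ⟨j0, hj0, hidx, hm, hu⟩
    · rw [if_neg (by rw [hneg]; decide)]
      refine ih r m hr fun j hj => ?_
      have := h j hj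
      rw [cnt_cons, if_neg (hnm j hj)] at this
      omega
    · rw [if_pos (by rw [hidx]; exact Int.natCast_nonneg _)]
      have htn : (jIdx c).toNat = j0 := by rw [hidx]; exact Int.toNat_natCast _
      rw [htn]
      have hcons := h j0 hj0
      rw [cnt_cons, if_pos hm] at hcons
      have hnn := cnt_nonneg p j0
      rw [if_neg (by rw [getD_set_self _ _ _ (by omega)]; omega)]
      refine ih _ m (by simp [hr]) fun j hj => ?_
      by_cases hji : j = j0
      · subst hji
        rw [getD_set_self _ _ _ (by omega)]
        omega
      · rw [getD_set_ne _ _ _ _ hji]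
        have := h j hj
        rw [cnt_cons, if_neg (fun hc => hji (hu j hj hc))] at this
        omega

theorem bLocate_some (p : List Char) : ∀ (r : List Int) (m : Int), r.length = 26 →
    (∃ j, j < 26 ∧ r.getD j 0 < m ∧ m ≤ r.getD j 0 + cnt p j) → bLocate m r p ≠ "" := by
  induction p with
  | nil =>
    intro r m _ ⟨j, _, h1, h2⟩
    rw [cnt_nil] at h2
    omega
  | cons c p ih =>
    intro r m hr ⟨j, hj, h1, h2⟩
    show (if 0 ≤ jIdx c then _ else _) ≠ ""
    rw [show PySem.Chars.find bLowers [PySem.Chars.lowerChar c] = jIdx c from rfl]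
    rcases classify c with ⟨hneg, hnm⟩ | ⟨j0, hj0, hidx, hm, hu⟩
    · rw [if_neg (by rw [hneg]; decide)]
      refine ih r m hr ⟨j, hj, h1, ?_⟩
      rw [cnt_cons, if_neg (hnm j hj)] at h2
      omega
    · rw [if_pos (by rw [hidx]; exact Int.natCast_nonneg _)]
      have htn : (jIdx c).toNat = j0 := by rw [hidx]; exact Int.toNat_natCast _
      rw [htn]
      by_cases heq : (r.set j0 (r.getD j0 0 + 1)).getD j0 0 = m
      · rw [if_pos heq]
        exact singNe c
      · rw [if_neg heq]
        rw [getD_set_self _ _ _ (by omega)] at heq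
        by_cases hji : j = j0
        · subst hji
          rw [cnt_cons, if_pos hm] at h2
          refine ih _ m (by simp [hr]) ⟨j, hj, ?_, ?_⟩
          · rw [getD_set_self _ _ _ (by omega)]; omega
          · rw [getD_set_self _ _ _ (by omega)]; omega
        · rw [cnt_cons, if_neg (fun hc => hji (hu j hj hc))] at h2
          refine ih _ m (by simp [hr]) ⟨j, hj, ?_, ?_⟩
          · rw [getD_set_ne _ _ _ _ hji]; omega
          · rw [getD_set_ne _ _ _ _ hji]; omega

theorem bLocate_append (p s : List Char) (m : Int) : ∀ (r : List Int),
    bLocate m r (p ++ s) =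
      if bLocate m r p = "" then bLocate m (runOf r p) s else bLocate m r p := by
  induction p with
  | nil => intro r; simp [bLocate, runOf]
  | cons c p ih =>
    intro r
    show (if 0 ≤ jIdx c then _ else _) = _
    rw [show PySem.Chars.find bLowers [PySem.Chars.lowerChar c] = jIdx c from rfl]
    by_cases hs : 0 ≤ jIdx c
    · rw [if_pos hs]
      have hrun : runOf r (c :: p) = runOf (r.set (jIdx c).toNat (r.getD (jIdx c).toNat 0 + 1)) p := by
        show List.foldl _ (runStep r c) p = _
        rw [runStep, if_pos hs]
        rfl
      by_cases heq : (r.set (jIdx c).toNat (r.getD (jIdx c).toNat 0 + 1)).getD (jIdx c).toNat 0 = m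
      · rw [if_pos heq]
        have hL : bLocate m r (c :: p) = String.singleton c := by
          show (if 0 ≤ jIdx c then _ else _) = _
          rw [show PySem.Chars.find bLowers [PySem.Chars.lowerChar c] = jIdx c from rfl]
          rw [if_pos hs, if_pos heq]
        rw [hL, if_neg (singNe c)]
      · rw [if_neg heq]
        have hL : bLocate m r (c :: p) = bLocate m (r.set (jIdx c).toNat (r.getD (jIdx c).toNat 0 + 1)) p := by
          show (if 0 ≤ jIdx c then _ else _) = _
          rw [show PySem.Chars.find bLowers [PySem.Chars.lowerChar c] = jIdx c from rfl]
          rw [if_pos hs, if_neg heq]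
        rw [hL, hrun]
        exact ih _
    · rw [if_neg hs]
      have hL : bLocate m r (c :: p) = bLocate m r p := by
        show (if 0 ≤ jIdx c then _ else _) = _
        rw [show PySem.Chars.find bLowers [PySem.Chars.lowerChar c] = jIdx c from rfl]
        rw [if_neg hs]
      have hrun : runOf r (c :: p) = runOf r p := by
        show List.foldl _ (runStep r c) p = _
        rw [runStep, if_neg hs]
        rfl
      rw [hL, hrun]
      exact ih _

theorem rep_getD (j : Nat) : (List.replicate 26 (0:Int)).getD j 0 = 0 := by
  by_cases h : j < 26
  · rw [List.getD_eq_getElem _ _ (by simpa using h)]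
    exact List.getElem_replicate _
  · exact getD_out _ _ (by simp; omega)

theorem res_found (p : List Char) (h0 : mx p ≠ 0) :
    bLocate (mx p) (List.replicate 26 (0:Int)) p ≠ "" := by
  rcases mx_attain p with h | ⟨j, hj, he⟩
  · exact absurd h h0
  · refine bLocate_some p _ _ (by simp) ⟨j, hj, ?_, ?_⟩
    · rw [rep_getD]
      have := mx_nonneg p
      omega
    · rw [rep_getD]
      omega

theorem res_snoc_miss (p : List Char) (c : Char) (hnm : ∀ j, j < 26 → ¬ mtch c j = true) :
    resOf (p ++ [c]) = resOf p := by
  unfold resOf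
  rw [mx_snoc_miss p c hnm]
  by_cases h0 : mx p = 0
  · rw [if_pos h0, if_pos h0]
  · rw [if_neg h0, if_neg h0, bLocate_append, if_neg (res_found p h0)]

theorem res_snoc_le (p : List Char) (c : Char) {j0 : Nat} (hj0 : j0 < 26)
    (hm : mtch c j0 = true) (hu : ∀ j, j < 26 → mtch c j = true → j = j0)
    (hle : cnt p j0 + 1 ≤ mx p) : resOf (p ++ [c]) = resOf p := by
  have hnn := cnt_nonneg p j0
  have h0 : mx p ≠ 0 := by omega
  unfold resOf
  rw [mx_snoc_hit p c hj0 hm hu, max_eq_left (by omega)]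
  rw [if_neg h0, if_neg h0, bLocate_append, if_neg (res_found p h0)]

theorem res_snoc_gt (p : List Char) (c : Char) {j0 : Nat} (hj0 : j0 < 26)
    (hm : mtch c j0 = true) (hu : ∀ j, j < 26 → mtch c j = true → j = j0)
    (hgt : mx p < cnt p j0 + 1) : resOf (p ++ [c]) = String.singleton c := by
  have hc0 : cnt p j0 = mx p := le_antisymm (cnt_le_mx p hj0) (by omega)
  have hnn := mx_nonneg p
  unfold resOf
  rw [mx_snoc_hit p c hj0 hm hu, hc0, max_eq_right (by omega)]
  rw [if_neg (by omega), bLocate_append]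
  rw [if_pos (bLocate_none p _ _ (by simp) (fun j hj => by
    rw [rep_getD]
    have := cnt_le_mx p hj
    omega))]
  obtain ⟨hlen, hget⟩ := runOf_spec p (List.replicate 26 (0:Int)) (by simp)
  have hidx' : jIdx c = (j0 : Int) := by
    rcases classify c with ⟨hneg, hnm2⟩ | ⟨j1, hj1, hidx, hm1, hu1⟩
    · exact absurd hm (hnm2 j0 hj0)
    · rw [hidx, Int.natCast_inj]
      exact hu j1 hj1 hm1
  show (if 0 ≤ jIdx c then _ else _) = _
  rw [show PySem.Chars.find bLowers [PySem.Chars.lowerChar c] = jIdx c from rfl]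
  rw [if_pos (by rw [hidx']; exact Int.natCast_nonneg _)]
  rw [show (jIdx c).toNat = j0 from by rw [hidx']; exact Int.toNat_natCast _]
  rw [if_pos (by
    rw [getD_set_self _ _ _ (by omega), hget j0 hj0, rep_getD, hc0]
    ring)]

set_option maxRecDepth 16384 in
theorem stepA (p : List Char) (c : Char) :
    aInner c (tabOf p, resOf p, mx p) = (tabOf (p ++ [c]), resOf (p ++ [c]), mx (p ++ [c])) := by
  rcases classify c with ⟨hneg, hnm⟩ | ⟨j0, hj0, hidx, hm, hu⟩
  · unfold aInner
    rw [seg_miss c _ _ (fun j hj => hnm j (List.mem_range.mp hj)) (tabOf_getD_all p)]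
    rw [tabOf_snoc_miss p c hnm, mx_snoc_miss p c hnm, res_snoc_miss p c hnm]
  · unfold aInner
    have hsplit : List.range 26 = (List.range j0 ++ [j0]) ++ (List.range (25 - j0)).map (fun i => (j0+1) + i) := by
      rw [show (26:Nat) = (j0+1) + (25 - j0) from by omega, List.range_add, List.range_succ]
    rw [hsplit, List.foldl_append, List.foldl_append]
    rw [seg_miss c (List.range j0) _
      (fun j hj hc => by
        have hlt := List.mem_range.mp hj
        have := hu j (by omega) hc
        omega)
      (tabOf_getD_all p)]
    have hbody : List.foldl (aBody c) (tabOf p, resOf p, mx p) [j0] =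
        if mx p < cnt p j0 + 1 then ((tabOf p).set j0 (cnt p j0 + 1), String.singleton c, cnt p j0 + 1)
        else ((tabOf p).set j0 (cnt p j0 + 1), resOf p, mx p) := by
      simp only [List.foldl_cons, List.foldl_nil]
      unfold aBody
      rw [if_pos ((mtch_iff c j0).mp hm)]
      dsimp only
      rw [tabOf_getD p hj0]
      rw [getD_set_self _ _ _ (by rw [tabOf_length]; omega)]
    rw [hbody]
    have hmiss : ∀ j ∈ (List.range (25 - j0)).map (fun i => (j0+1) + i), ¬ mtch c j = true := by
      intro j hjm hc
      obtain ⟨i, hi, rfl⟩ := List.mem_map.mp hjm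
      have hi' := List.mem_range.mp hi
      have := hu _ (by omega) hc
      omega
    split_ifs with hgt
    · rw [seg_miss c _ _ hmiss (fun j => ?_)]
      · rw [tabOf_snoc_hit p c hj0 hm hu, mx_snoc_hit p c hj0 hm hu,
          res_snoc_gt p c hj0 hm hu hgt, max_eq_right (le_of_lt hgt)]
      · show ((tabOf p).set j0 (cnt p j0 + 1)).getD j 0 ≤ cnt p j0 + 1
        by_cases h : j = j0
        · subst h
          rw [getD_set_self _ _ _ (by rw [tabOf_length]; omega)]
        · rw [getD_set_ne _ _ _ _ h]
          have := tabOf_getD_all p j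
          omega
    · rw [seg_miss c _ _ hmiss (fun j => ?_)]
      · rw [tabOf_snoc_hit p c hj0 hm hu, mx_snoc_hit p c hj0 hm hu,
          res_snoc_le p c hj0 hm hu (by omega), max_eq_left (by omega)]
      · show ((tabOf p).set j0 (cnt p j0 + 1)).getD j 0 ≤ mx p
        by_cases h : j = j0
        · subst h
          rw [getD_set_self _ _ _ (by rw [tabOf_length]; omega)]
          omega
        · rw [getD_set_ne _ _ _ _ h]
          exact tabOf_getD_all p j

set_option maxRecDepth 8192 in
theorem amain (p : List Char) :
    p.foldl (fun st c => aInner c st) (List.replicate 26 (0:Int), "", (0:Int)) =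
      (tabOf p, resOf p, mx p) := by
  induction p using List.reverseRecOn with
  | nil => decide
  | append_singleton p c ih => rw [List.foldl_append, ih, List.foldl_cons, List.foldl_nil, stepA]

-- ===== assembling =====
theorem occA (message : String) : occurence2 message = resOf message.toList := by
  unfold occurence2
  rw [amain]

theorem occB (message : String) : occurence2_alt message = resOf message.toList := by
  have hm : bLowers.foldl (fun m l =>
      let c : Int := (message.toList.countP (fun ch => decide (PySem.Chars.lowerChar ch = l)) : Int)
      if c > m then c else m) 0 = mx message.toList := by
    rw [show bLowers = (List.range 26).map (fun j => bLowers.getD j ' ') from by decide]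
    rw [List.foldl_map]
    unfold mx
    refine PySem.List.foldl_congr_mem _ _ _ _ ?_
    intro acc j hjm
    have hj := List.mem_range.mp hjm
    dsimp only
    have hcnt : (message.toList.countP (fun ch => decide (PySem.Chars.lowerChar ch = bLowers.getD j ' ')) : Int) = cnt message.toList j := by
      unfold cnt
      congr 1
      refine List.countP_congr ?_
      intro ch _
      cases hmc : mtch ch j with
      | false =>
        constructor
        · intro h
          have hk := (key j hj ch).mp (of_decide_eq_true h)
          simp [hk] at hmc
        · intro h
          cases h
      | true =>
        constructor
        · intro _; rfl
        · intro _; exact decide_eq_true ((key j hj ch).mpr hmc)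
    rw [hcnt]
    by_cases h : cnt message.toList j > acc
    · rw [if_pos h, max_eq_right (le_of_lt h)]
    · rw [if_neg h, max_eq_left (not_lt.mp h)]
  unfold occurence2_alt
  rw [hm]
  rfl

-- ===== VERDICT (by name: the statement is the Claim_ definition above) =====
theorem occurence2_spec : Claim_equal_occurence2 := by
  intro message _
  unfold Spec_occurence2
  rw [occA, occB]
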